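-- pv_equiv track=rewrite | github.com/DSchaap/chess-app | chess-ai/legalMoves.py | clearPath
-- ===== SOURCE A (Python) =====
-- def clearPath(direction,model,origin,pieceColor,path):
--     [v1,v2] = direction
--     [row,col] = origin
--     board = dict(model["board"])
--     occupied = board.keys()
--     if (not ((row+v1 in range(8)) and (col+v2 in range(8)))):
--         return path
--     else:
--         if (row+v1 ,col+v2) in occupied:
--             if (board[(row+v1 ,col+v2)]["color"] == pieceColor):
--                 return path
--             else:
--                 path.append((row+v1 ,col+v2))
--                 return path
--         else:
--             path.append((row+v1 ,col+v2))
--             return clearPath(direction,model,(row+v1 ,col+v2),pieceColor,path)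
-- ===== SOURCE B (Python) =====
-- def clearPath(direction, model, origin, pieceColor, path):
--     v1, v2 = direction
--     r, c = origin
--     board = dict(model["board"])
--     while True:
--         r += v1
--         c += v2
--         if not (0 <= r < 8 and 0 <= c < 8):
--             return path
--         sq = board.get((r, c))
--         if sq is not None:
--             if sq["color"] != pieceColor:
--                 path.append((r, c))
--             return path
--         path.append((r, c))
-- ===== Notes on version B (the rewrite author's own statement) =====
-- stated objective: simpler
-- what changed: The tail recursion (which rebuilds the board dict and re-destructures direction on every call) is replaced by a single iterative while loop that builds the dict once and steps a cursor, using one dict.get instead of a membership test plus indexing.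
import Mathlib
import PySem

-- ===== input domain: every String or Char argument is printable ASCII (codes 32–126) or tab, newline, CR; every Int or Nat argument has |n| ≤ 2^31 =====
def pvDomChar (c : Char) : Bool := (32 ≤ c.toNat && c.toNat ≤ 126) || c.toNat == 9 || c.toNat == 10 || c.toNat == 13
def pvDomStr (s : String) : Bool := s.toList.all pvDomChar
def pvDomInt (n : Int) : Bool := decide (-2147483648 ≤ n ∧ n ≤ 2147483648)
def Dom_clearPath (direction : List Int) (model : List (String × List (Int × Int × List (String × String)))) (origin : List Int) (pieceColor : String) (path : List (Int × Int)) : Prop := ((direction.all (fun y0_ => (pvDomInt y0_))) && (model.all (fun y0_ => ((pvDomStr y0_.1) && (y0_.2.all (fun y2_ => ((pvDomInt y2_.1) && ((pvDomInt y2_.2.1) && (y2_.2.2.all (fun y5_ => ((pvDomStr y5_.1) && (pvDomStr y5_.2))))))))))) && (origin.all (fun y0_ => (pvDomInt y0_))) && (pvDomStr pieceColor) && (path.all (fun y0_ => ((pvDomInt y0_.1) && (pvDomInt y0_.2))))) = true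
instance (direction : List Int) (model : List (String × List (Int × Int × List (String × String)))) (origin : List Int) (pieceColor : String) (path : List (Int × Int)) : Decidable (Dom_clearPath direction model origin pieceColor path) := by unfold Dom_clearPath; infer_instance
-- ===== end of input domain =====

-- B replaces A's tail recursion (board dict rebuilt every call) by one iterative loop over a cursor
-- with the dict built once; equivalence is about the RETURN value (both Pythons append to `path` in place identically).

-- ===== PORT A =====
-- dict(model["board"]) : board pairs (r, c, d) keyed by the square (r, c)
def pvBoardDict (b : List (Int × Int × List (String × String))) : PySem.Dict (Int × Int) (List (String × String)) :=
  PySem.Dict.ofList (b.map (fun e => ((e.1, e.2.1), e.2.2)))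

-- A's recursion on the (row, col) cursor; A rebuilds `board` from `model` on every call, so the
-- model lookup and dict construction sit inside the loop body, exactly as in the Python.
-- `fuel` only makes the recursion total: within Pre_ the Python terminates in < 16 calls.
def clearPathGoA (fuel : Nat) (v1 v2 : Int) (model : List (String × List (Int × Int × List (String × String)))) (row col : Int) (pieceColor : String) (path : List (Int × Int)) : List (Int × Int) :=
  match fuel with
  | 0 => path
  | fuel + 1 =>
    match (PySem.Dict.mk model).get? "board" with
    | none => path  -- Python raises KeyError here (outside Pre_)
    | some b =>
      let board := pvBoardDict b
      if ¬(0 ≤ row + v1 ∧ row + v1 < 8 ∧ 0 ≤ col + v2 ∧ col + v2 < 8) then path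
      else
        if board.contains (row + v1, col + v2) then
          match board.get? (row + v1, col + v2) with
          | none => path  -- unreachable: contains just held
          | some sq =>
            match (PySem.Dict.mk sq).get? "color" with
            | none => path  -- Python raises KeyError here (outside Pre_)
            | some sqColor => if sqColor = pieceColor then path else path ++ [(row + v1, col + v2)]
        else clearPathGoA fuel v1 v2 model (row + v1) (col + v2) pieceColor (path ++ [(row + v1, col + v2)])

def clearPath (direction : List Int) (model : List (String × List (Int × Int × List (String × String)))) (origin : List Int) (pieceColor : String) (path : List (Int × Int)) : List (Int × Int) :=
  match direction, origin with
  | [v1, v2], [row, col] => clearPathGoA 16 v1 v2 model row col pieceColor path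
  | _, _ => path  -- Python raises ValueError on unpacking (outside Pre_)

-- ===== PORT B =====
-- B's while-loop: the board dict is fixed, only the cursor and path change; one get? decides the branch.
def clearPathLoopB (fuel : Nat) (board : PySem.Dict (Int × Int) (List (String × String))) (v1 v2 r c : Int) (pieceColor : String) (path : List (Int × Int)) : List (Int × Int) :=
  match fuel with
  | 0 => path
  | fuel + 1 =>
    if 0 ≤ r + v1 ∧ r + v1 < 8 ∧ 0 ≤ c + v2 ∧ c + v2 < 8 then
      match board.get? (r + v1, c + v2) with
      | some sq =>
        match (PySem.Dict.mk sq).get? "color" with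
        | none => path  -- Python raises KeyError here (outside Pre_)
        | some sqColor => if sqColor ≠ pieceColor then path ++ [(r + v1, c + v2)] else path
      | none => clearPathLoopB fuel board v1 v2 (r + v1) (c + v2) pieceColor (path ++ [(r + v1, c + v2)])
    else path

-- `v1, v2 = direction` / `r, c = origin`: exactly two elements, else Python raises (outside Pre_)
def clearPath_alt (direction : List Int) (model : List (String × List (Int × Int × List (String × String)))) (origin : List Int) (pieceColor : String) (path : List (Int × Int)) : List (Int × Int) :=
  if direction.length = 2 ∧ origin.length = 2 then
    let v1 := direction.getD 0 0
    let v2 := direction.getD 1 0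
    let r := origin.getD 0 0
    let c := origin.getD 1 0
    match (PySem.Dict.mk model).get? "board" with
    | none => path
    | some b => clearPathLoopB 16 (pvBoardDict b) v1 v2 r c pieceColor path
  else path

-- ===== PRECONDITION & SPEC =====
def pvInR (r c : Int) : Bool := decide (0 ≤ r) && decide (r < 8) && decide (0 ≤ c) && decide (c < 8)

-- Pre_ excludes exactly the inputs where the Python A raises: direction/origin not of length 2
-- (ValueError), no "board" key (KeyError), direction [0,0] walking an in-range unoccupied square
-- (RecursionError), and a first occupied ray square whose piece dict lacks "color" (KeyError).
def pvPreCheck (direction : List Int) (model : List (String × List (Int × Int × List (String × String)))) (origin : List Int) : Bool :=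
  if direction.length = 2 ∧ origin.length = 2 then
    let v1 := direction.getD 0 0
    let v2 := direction.getD 1 0
    let row := origin.getD 0 0
    let col := origin.getD 1 0
    match (PySem.Dict.mk model).get? "board" with
    | none => false
    | some b =>
      let occ : Int × Int → Bool := fun p => (pvBoardDict b).contains p
      (!(v1 == 0 && v2 == 0 && pvInR (row + v1) (col + v2) && !(occ (row + v1, col + v2)))) &&
      ((List.range 8).all (fun i =>
        let k : Int := (i : Int) + 1
        -- the walk reaches step k on an occupied square iff steps 1..k are in range,
        -- steps 1..k-1 are unoccupied, and step k is occupied; then it reads "color" there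
        if ((List.range (i + 1)).all (fun j =>
              let m : Int := (j : Int) + 1
              pvInR (row + m * v1) (col + m * v2) && (j ≥ i || !(occ (row + m * v1, col + m * v2)))))
           && occ (row + k * v1, col + k * v2)
        then match (pvBoardDict b).get? (row + k * v1, col + k * v2) with
             | some sq => (PySem.Dict.mk sq).contains "color"
             | none => true
        else true))
  else false

def Pre_clearPath (direction : List Int) (model : List (String × List (Int × Int × List (String × String)))) (origin : List Int) (pieceColor : String) (path : List (Int × Int)) : Prop :=
  pvPreCheck direction model origin = true
instance (direction : List Int) (model : List (String × List (Int × Int × List (String × String)))) (origin : List Int) (pieceColor : String) (path : List (Int × Int)) : Decidable (Pre_clearPath direction model origin pieceColor path) := by unfold Pre_clearPath; infer_instance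

def pvWitness_clearPath : List Int × (List (String × List (Int × Int × List (String × String)))) × List Int × String × (List (Int × Int)) :=
  ([1, 0], [("board", [(3, 0, [("color", "w")])])], [0, 0], "b", [])

def Spec_clearPath (direction : List Int) (model : List (String × List (Int × Int × List (String × String)))) (origin : List Int) (pieceColor : String) (path : List (Int × Int)) (out : List (Int × Int)) : Prop := out = clearPath_alt direction model origin pieceColor path
instance (direction : List Int) (model : List (String × List (Int × Int × List (String × String)))) (origin : List Int) (pieceColor : String) (path : List (Int × Int)) (out : List (Int × Int)) : Decidable (Spec_clearPath direction model origin pieceColor path out) := by unfold Spec_clearPath; infer_instance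

-- ===== CLAIM (what is proved, stated in full; the proofs are below) =====
def Claim_equal_clearPath : Prop := ∀ (direction : List Int) (model : List (String × List (Int × Int × List (String × String)))) (origin : List Int) (pieceColor : String) (path : List (Int × Int)), Dom_clearPath direction model origin pieceColor path → Pre_clearPath direction model origin pieceColor path → Spec_clearPath direction model origin pieceColor path (clearPath direction model origin pieceColor path)

-- ===== LEMMAS AND PROOFS =====

-- the two loops run the same state machine (A merely refetches the unchanging board each call)
theorem go_eq (fuel : Nat) (v1 v2 : Int) (model : List (String × List (Int × Int × List (String × String)))) (b : List (Int × Int × List (String × String))) (hb : (PySem.Dict.mk model).get? "board" = some b) (row col : Int) (pieceColor : String) (path : List (Int × Int)) :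
    clearPathGoA fuel v1 v2 model row col pieceColor path = clearPathLoopB fuel (pvBoardDict b) v1 v2 row col pieceColor path := by
  induction fuel generalizing row col path with
  | zero => rfl
  | succ n ih =>
    rw [clearPathGoA, clearPathLoopB, hb]
    dsimp only
    by_cases hr : 0 ≤ row + v1 ∧ row + v1 < 8 ∧ 0 ≤ col + v2 ∧ col + v2 < 8
    · rw [if_neg (not_not_intro hr), if_pos hr]
      cases hg : (pvBoardDict b).get? (row + v1, col + v2) with
      | none =>
        have hc : (pvBoardDict b).contains (row + v1, col + v2) = false := by
          rw [PySem.Dict.contains_eq_isSome_get?, hg]; rfl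
        rw [hc]; simp only [Bool.false_eq_true, if_false]
        exact ih (row + v1) (col + v2) (path ++ [(row + v1, col + v2)])
      | some sq =>
        have hc : (pvBoardDict b).contains (row + v1, col + v2) = true := by
          rw [PySem.Dict.contains_eq_isSome_get?, hg]; rfl
        rw [hc]; simp only [if_true]
        cases (PySem.Dict.mk sq).get? "color" with
        | none => rfl
        | some sqColor =>
          by_cases he : sqColor = pieceColor <;> simp [he]
    · rw [if_pos hr, if_neg hr]

theorem clearPath_eq_alt (direction : List Int) (model : List (String × List (Int × Int × List (String × String)))) (origin : List Int) (pieceColor : String) (path : List (Int × Int)) :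
    clearPath direction model origin pieceColor path = clearPath_alt direction model origin pieceColor path := by
  rcases direction with _ | ⟨v1, _ | ⟨v2, _ | _⟩⟩ <;>
    rcases origin with _ | ⟨row, _ | ⟨col, _ | _⟩⟩ <;>
      simp only [clearPath, clearPath_alt, List.length_cons, List.length_nil, List.getD,
        List.getElem?_cons_zero, List.getElem?_cons_succ, Option.getD_some] <;>
        try rw [if_neg (by rintro ⟨h1, h2⟩; omega)]
  rw [if_pos ⟨by simp, by simp⟩]
  cases hb : (PySem.Dict.mk model).get? "board" with
  | none => rw [clearPathGoA, hb]
  | some b => exact go_eq 16 v1 v2 model b hb row col pieceColor path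

-- ===== VERDICT (by name: the statement is the Claim_ definition above) =====
theorem clearPath_spec : Claim_equal_clearPath := by
  intro direction model origin pieceColor path _ _
  unfold Spec_clearPath
  exact clearPath_eq_alt direction model origin pieceColor path
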